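-- pv_equiv track=rewrite | github.com/JayHawk-Dream-Team/Project_2-MineSweeper-Group1 | ai.py | hidden_unflagged
-- ===== SOURCE A (Python) =====
-- from typing import List, Tuple, Set
--
-- Coord = Tuple[int, int] #use tuples for the coordinates and actions for ai
--
-- def hidden_unflagged(rows: int, cols: int, revealed: Set[Coord], flagged: Set[Coord]) -> List[Coord]:
--     #find hidden or unflagged cells
--     return [
--         (r, c) #for each cell at row r, col c
--         for r in range(rows) #loop through all rows and columns
--         for c in range(cols)
--         if (r, c) not in revealed #include only if the cell is not revealed or flagged
--         and (r, c) not in flagged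
--     ]
-- ===== SOURCE B (Python) =====
-- def hidden_unflagged(rows, cols, revealed, flagged):
--     # Linearize blocked cells to indices r*cols+c, sort them, and emit the
--     # gap runs between consecutive blocked indices, decoding with divmod.
--     if rows <= 0 or cols <= 0:
--         return []
--     total = rows * cols
--     blocked = sorted(
--         {r * cols + c for (r, c) in revealed if 0 <= r < rows and 0 <= c < cols}
--         | {r * cols + c for (r, c) in flagged if 0 <= r < rows and 0 <= c < cols})
--     out = []
--     prev = 0
--     for b in blocked:
--         for i in range(prev, b):
--             out.append((i // cols, i % cols))
--         prev = b + 1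
--     for i in range(prev, total):
--         out.append((i // cols, i % cols))
--     return out
-- ===== Notes on version B (the rewrite author's own statement) =====
-- stated objective: alternative
-- what changed: Instead of scanning every grid cell and membership-testing it, B linearizes the in-range blocked cells to indices r*cols+c, sorts them, and emits the gap runs between consecutive blocked indices, decoding each index back to (row, col) with divmod; the per-cell membership test and the grid enumeration filter are gone.
import Mathlib
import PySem

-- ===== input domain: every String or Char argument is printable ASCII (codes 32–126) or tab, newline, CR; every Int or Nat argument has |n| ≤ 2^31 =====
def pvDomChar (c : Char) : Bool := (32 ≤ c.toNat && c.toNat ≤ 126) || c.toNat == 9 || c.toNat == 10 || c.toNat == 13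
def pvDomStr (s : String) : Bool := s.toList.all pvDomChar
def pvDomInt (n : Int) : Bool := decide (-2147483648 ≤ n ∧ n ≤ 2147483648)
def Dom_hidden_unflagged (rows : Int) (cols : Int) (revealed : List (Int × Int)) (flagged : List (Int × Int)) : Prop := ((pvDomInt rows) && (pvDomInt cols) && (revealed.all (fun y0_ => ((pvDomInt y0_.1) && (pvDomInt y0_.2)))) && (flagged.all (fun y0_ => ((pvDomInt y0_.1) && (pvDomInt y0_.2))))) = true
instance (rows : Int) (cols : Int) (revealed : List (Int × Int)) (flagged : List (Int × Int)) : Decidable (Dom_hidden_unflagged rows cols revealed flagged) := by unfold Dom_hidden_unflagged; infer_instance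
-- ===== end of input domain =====

-- B replaces A's filtered grid scan by sorting the linearized blocked indices and emitting the gap runs between them (alternative algorithm; same result).

-- ===== PORT A =====
def hidden_unflagged (rows : Int) (cols : Int) (revealed : List (Int × Int)) (flagged : List (Int × Int)) : List (Int × Int) :=
  (PySem.List.pyRange 0 rows).foldl (fun acc r =>
    (PySem.List.pyRange 0 cols).foldl (fun acc c =>
      if !revealed.contains (r, c) && !flagged.contains (r, c) then acc ++ [(r, c)] else acc) acc) []

-- ===== PORT B =====
-- '0 <= r < rows and 0 <= c < cols'
def pvInRange (rows : Int) (cols : Int) (p : Int × Int) : Bool :=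
  decide (0 ≤ p.1) && decide (p.1 < rows) && decide (0 ≤ p.2) && decide (p.2 < cols)

-- 'r * cols + c'
def pvLin (cols : Int) (p : Int × Int) : Int := p.1 * cols + p.2

-- 'divmod(i, cols)' = (i // cols, i % cols)
def pvFromLin (cols : Int) (i : Int) : Int × Int := (PySem.Int.floordiv i cols, PySem.Int.mod i cols)

def hidden_unflagged_alt (rows : Int) (cols : Int) (revealed : List (Int × Int)) (flagged : List (Int × Int)) : List (Int × Int) :=
  if rows ≤ 0 ∨ cols ≤ 0 then []
  else
    let total := rows * cols
    let blocked : List Int :=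
      PySem.List.sorted
        (PySem.Set.union
          (PySem.Set.ofList ((revealed.filter (pvInRange rows cols)).map (pvLin cols)))
          (PySem.Set.ofList ((flagged.filter (pvInRange rows cols)).map (pvLin cols))))
        (fun x => x) false
    let st := blocked.foldl (fun st b =>
        (b + 1, (PySem.List.pyRange st.1 b).foldl (fun out i => out ++ [pvFromLin cols i]) st.2))
      ((0 : Int), ([] : List (Int × Int)))
    (PySem.List.pyRange st.1 total).foldl (fun out i => out ++ [pvFromLin cols i]) st.2

-- ===== PRECONDITION & SPEC =====
def Spec_hidden_unflagged (rows : Int) (cols : Int) (revealed : List (Int × Int)) (flagged : List (Int × Int)) (out : List (Int × Int)) : Prop := out = hidden_unflagged_alt rows cols revealed flagged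
instance (rows : Int) (cols : Int) (revealed : List (Int × Int)) (flagged : List (Int × Int)) (out : List (Int × Int)) : Decidable (Spec_hidden_unflagged rows cols revealed flagged out) := by unfold Spec_hidden_unflagged; infer_instance

-- ===== CLAIM (what is proved, stated in full; the proofs are below) =====
def Claim_equal_hidden_unflagged : Prop := ∀ (rows : Int) (cols : Int) (revealed : List (Int × Int)) (flagged : List (Int × Int)), Dom_hidden_unflagged rows cols revealed flagged → Spec_hidden_unflagged rows cols revealed flagged (hidden_unflagged rows cols revealed flagged)

-- ===== LEMMAS AND PROOFS =====

-- the row-major grid A iterates over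
def pvGrid (rows cols : Int) : List (Int × Int) :=
  (PySem.List.pyRange 0 rows).flatMap (fun r => (PySem.List.pyRange 0 cols).map (fun c => (r, c)))

lemma pvA_filter (rows cols : Int) (revealed flagged : List (Int × Int)) :
    hidden_unflagged rows cols revealed flagged =
      (pvGrid rows cols).filter (fun p => !revealed.contains p && !flagged.contains p) := by
  unfold hidden_unflagged pvGrid
  rw [show (fun (acc : List (Int × Int)) r =>
        (PySem.List.pyRange 0 cols).foldl (fun acc c =>
          if !revealed.contains (r, c) && !flagged.contains (r, c) then acc ++ [(r, c)] else acc) acc)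
      = (fun acc r => acc ++
          ((PySem.List.pyRange 0 cols).filter
            (fun c => !revealed.contains (r, c) && !flagged.contains (r, c))).map (fun c => (r, c)))
    from funext fun acc => funext fun r => PySem.List.foldl_append_if _ _ _ _]
  rw [PySem.List.foldl_append_eq_flatMap, List.nil_append, List.filter_flatMap]
  congr 1
  funext r
  rw [List.filter_map]
  rfl

-- decoding the linear index recovers the grid, row-major
lemma pvGrid_nat (cols : Int) (hc : 0 < cols) :
    ∀ n : Nat, pvGrid (n : Int) cols = (PySem.List.pyRange 0 ((n : Int) * cols)).map (pvFromLin cols) := by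
  intro n
  induction n with
  | zero => simp [pvGrid, PySem.List.pyRange_one_eq_nil (by omega : (0:Int) ≤ 0)]
  | succ n ih =>
    have hcast : ((n + 1 : Nat) : Int) = (n : Int) + 1 := by push_cast; ring
    have h1 : PySem.List.pyRange 0 ((n:Int) + 1) = PySem.List.pyRange 0 (n:Int) ++ [(n:Int)] :=
      PySem.List.pyRange_one_succ_right (by positivity)
    have hnc : (0:Int) ≤ (n:Int) * cols := by positivity
    have hsplit : PySem.List.pyRange 0 (((n:Int)+1) * cols)
        = PySem.List.pyRange 0 ((n:Int)*cols) ++ PySem.List.pyRange ((n:Int)*cols) (((n:Int)+1)*cols) :=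
      PySem.List.pyRange_one_append 0 ((n:Int)*cols) (((n:Int)+1)*cols) hnc (by nlinarith)
    rw [hcast]
    unfold pvGrid
    rw [h1, List.flatMap_append, hsplit, List.map_append]
    refine congrArg₂ (· ++ ·) ih ?_
    simp only [List.flatMap_cons, List.flatMap_nil, List.append_nil]
    rw [PySem.List.pyRange_one ((n:Int)*cols) (((n:Int)+1)*cols),
        PySem.List.pyRange_one 0 cols]
    have hlen : ((((n:Int)+1)*cols) - (n:Int)*cols).toNat = (cols - 0).toNat := by
      congr 1; ring
    rw [hlen, List.map_map, List.map_map]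
    apply List.map_congr_left
    intro k hk
    have hkc : (k : Int) < cols := by
      have := List.mem_range.mp hk; omega
    have hk0 : (0:Int) ≤ (k:Int) := by positivity
    have hx : ((n:Int)+1)*cols = (n:Int)*cols + cols := by ring
    have hq : PySem.Int.floordiv ((n:Int)*cols + (k:Int)) cols = (n:Int) :=
      (PySem.Int.floordiv_eq_iff_of_pos hc).mpr ⟨by linarith, by rw [hx]; linarith⟩
    have hm : PySem.Int.mod ((n:Int)*cols + (k:Int)) cols = (k:Int) := by
      have := PySem.Int.floordiv_mul_add_mod ((n:Int)*cols + (k:Int)) cols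
      rw [hq] at this; linarith
    simp only [Function.comp, pvFromLin, hq, hm, zero_add]

lemma pvLin_bounds (rows cols : Int) (p : Int × Int) (h : pvInRange rows cols p = true) :
    0 ≤ pvLin cols p ∧ pvLin cols p < rows * cols := by
  unfold pvInRange at h
  simp only [Bool.and_eq_true, decide_eq_true_eq] at h
  obtain ⟨⟨⟨h1, h2⟩, h3⟩, h4⟩ := h
  unfold pvLin
  have hcp : (0:Int) ≤ cols := by omega
  constructor
  · nlinarith [mul_nonneg h1 hcp]
  · nlinarith [mul_le_mul_of_nonneg_right (show p.1 + 1 ≤ rows by omega) hcp]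

-- membership of a decoded cell in a raw list ↔ membership of its index in the linearized in-range list
lemma pvMem_lin (rows cols : Int) (hc : 0 < cols) (xs : List (Int × Int)) (i : Int)
    (h0 : 0 ≤ i) (hi : i < rows * cols) :
    xs.contains (pvFromLin cols i)
      = ((xs.filter (pvInRange rows cols)).map (pvLin cols)).contains i := by
  rw [Bool.eq_iff_iff]
  simp only [List.contains_iff_mem, List.mem_map, List.mem_filter]
  constructor
  · intro hmem
    refine ⟨pvFromLin cols i, ⟨hmem, ?_⟩, ?_⟩
    · unfold pvInRange pvFromLin
      simp only [Bool.and_eq_true, decide_eq_true_eq]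
      refine ⟨⟨⟨?_, ?_⟩, PySem.Int.mod_nonneg _ hc⟩, PySem.Int.mod_lt _ hc⟩
      · exact (PySem.Int.le_floordiv_iff_mul_le hc).mpr (by linarith)
      · exact (PySem.Int.floordiv_lt_iff_lt_mul hc).mpr hi
    · unfold pvLin pvFromLin
      exact PySem.Int.floordiv_mul_add_mod i cols
  · rintro ⟨p, ⟨hp, hin⟩, hlin⟩
    unfold pvInRange at hin
    simp only [Bool.and_eq_true, decide_eq_true_eq] at hin
    obtain ⟨⟨⟨h1, h2⟩, h3⟩, h4⟩ := hin
    unfold pvLin at hlin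
    have hx : (p.1+1)*cols = p.1*cols + cols := by ring
    have hq : PySem.Int.floordiv i cols = p.1 :=
      (PySem.Int.floordiv_eq_iff_of_pos hc).mpr ⟨by linarith, by rw [hx]; linarith⟩
    have hm : PySem.Int.mod i cols = p.2 := by
      have := PySem.Int.floordiv_mul_add_mod i cols
      rw [hq] at this; linarith
    have : pvFromLin cols i = p := by
      unfold pvFromLin; rw [hq, hm]
    rw [this]; exact hp

-- the gap-run walk over a sorted blocked list produces the filtered range, decoded
lemma pvWalk (cols total : Int) (blocked : List Int) (hp : blocked.Pairwise (· < ·)) :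
    ∀ (lo : Int) (out0 : List (Int × Int)), (∀ b ∈ blocked, lo ≤ b ∧ b < total) →
      (PySem.List.pyRange
          (blocked.foldl (fun st b =>
            (b + 1, (PySem.List.pyRange st.1 b).foldl (fun out i => out ++ [pvFromLin cols i]) st.2))
            (lo, out0)).1 total).foldl (fun out i => out ++ [pvFromLin cols i])
        (blocked.foldl (fun st b =>
            (b + 1, (PySem.List.pyRange st.1 b).foldl (fun out i => out ++ [pvFromLin cols i]) st.2))
            (lo, out0)).2
      = out0 ++ ((PySem.List.pyRange lo total).filter (fun i => !blocked.contains i)).map (pvFromLin cols) := by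
  induction blocked with
  | nil =>
    intro lo out0 _
    rw [List.foldl_nil, PySem.List.foldl_append_singleton_eq_map]
    simp
  | cons b t ih =>
    intro lo out0 hb
    obtain ⟨hlob, hbt⟩ := hb b (List.mem_cons_self)
    have hpc := List.pairwise_cons.mp hp
    have ih' := ih hpc.2 (b + 1) (out0 ++ (PySem.List.pyRange lo b).map (pvFromLin cols))
        (fun x hx => ⟨by have := hpc.1 x hx; omega, (hb x (List.mem_cons_of_mem _ hx)).2⟩)
    simp only [List.foldl_cons, PySem.List.foldl_append_singleton_eq_map] at ih' ⊢
    rw [ih']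
    rw [PySem.List.pyRange_one_append lo (b+1) total (by omega) (by omega),
        PySem.List.pyRange_one_succ_right hlob]
    rw [List.filter_append, List.filter_append, List.map_append, List.map_append]
    have e1 : (PySem.List.pyRange lo b).filter (fun i => !(b :: t).contains i)
        = PySem.List.pyRange lo b := by
      apply List.filter_eq_self.mpr
      intro i hi
      have hib : i < b := (PySem.List.mem_pyRange_one.mp hi).2
      cases hcb : (b :: t).contains i
      · rfl
      · exfalso
        rcases List.mem_cons.mp (List.contains_iff_mem.mp hcb) with rfl | hit
        · omega
        · exact absurd (hpc.1 i hit) (by omega)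
    have e2 : ([b] : List Int).filter (fun i => !(b :: t).contains i) = [] := by
      simp
    have e3 : (PySem.List.pyRange (b+1) total).filter (fun i => !(b :: t).contains i)
        = (PySem.List.pyRange (b+1) total).filter (fun i => !t.contains i) := by
      apply List.filter_congr
      intro i hi
      have hib : b < i := by have := (PySem.List.mem_pyRange_one.mp hi).1; omega
      have hne : (i == b) = false := beq_eq_false_iff_ne.mpr (by omega)
      rw [List.contains_cons, hne, Bool.false_or]
    rw [e1, e2, e3]
    simp [List.append_assoc]

lemma pvPairwise_lt_of_le_nodup (l : List Int) (h1 : l.Pairwise (· ≤ ·)) (h2 : l.Nodup) :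
    l.Pairwise (· < ·) :=
  (h1.and h2).imp (fun hab => lt_of_le_of_ne hab.1 hab.2)

-- ===== VERDICT (by name: the statement is the Claim_ definition above) =====
theorem hidden_unflagged_spec : Claim_equal_hidden_unflagged := by
  intro rows cols revealed flagged _
  unfold Spec_hidden_unflagged hidden_unflagged_alt
  by_cases h : rows ≤ 0 ∨ cols ≤ 0
  · rw [if_pos h, pvA_filter]
    unfold pvGrid
    rcases h with h | h
    · rw [PySem.List.pyRange_one_eq_nil h]; rfl
    · rw [show (fun r => (PySem.List.pyRange 0 cols).map (fun c => (r, c)))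
          = (fun _ => ([] : List (Int × Int)))
        from funext fun r => by rw [PySem.List.pyRange_one_eq_nil h]; rfl]
      simp
  · rw [if_neg h]
    have hr : 0 < rows := by omega
    have hc : 0 < cols := by omega
    set l1 : List Int := (revealed.filter (pvInRange rows cols)).map (pvLin cols) with hl1
    set l2 : List Int := (flagged.filter (pvInRange rows cols)).map (pvLin cols) with hl2
    set blocked : List Int :=
      PySem.List.sorted (PySem.Set.union (PySem.Set.ofList l1) (PySem.Set.ofList l2))
        (fun x => x) false with hbl
    have hmemb : ∀ b : Int, b ∈ blocked ↔ b ∈ l1 ∨ b ∈ l2 := by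
      intro b
      rw [hbl, (PySem.List.sorted_perm _ _ _).mem_iff, PySem.Set.mem_union]
      simp [PySem.Set.mem_ofList]
    have hpair : blocked.Pairwise (· < ·) := by
      apply pvPairwise_lt_of_le_nodup
      · exact PySem.List.sorted_pairwise _ _
      · rw [hbl]
        exact ((PySem.List.sorted_perm (PySem.Set.union (PySem.Set.ofList l1)
            (PySem.Set.ofList l2)) (fun x : Int => x) false).nodup_iff).mpr
          (PySem.Set.nodup_union _ _ (PySem.Set.nodup_ofList _))
    have hbnd : ∀ b ∈ blocked, (0:Int) ≤ b ∧ b < rows * cols := by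
      intro b hbmem
      have hex : ∃ p, pvInRange rows cols p = true ∧ pvLin cols p = b := by
        rcases (hmemb b).mp hbmem with hm | hm <;>
        · obtain ⟨p, hp, hpb⟩ := List.mem_map.mp hm
          exact ⟨p, (List.mem_filter.mp hp).2, hpb⟩
      obtain ⟨p, hin, hlin⟩ := hex
      rw [← hlin]
      exact pvLin_bounds rows cols p hin
    rw [pvWalk cols (rows*cols) blocked hpair 0 [] hbnd, List.nil_append]
    rw [pvA_filter]
    have hrowcast : rows = ((rows.toNat : Int)) := by omega
    rw [hrowcast, pvGrid_nat cols hc rows.toNat, ← hrowcast]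
    rw [List.filter_map]
    congr 1
    apply List.filter_congr
    intro i hi
    obtain ⟨h0, hilt⟩ := PySem.List.mem_pyRange_one.mp hi
    have hcont : blocked.contains i = (l1.contains i || l2.contains i) := by
      rw [Bool.eq_iff_iff]
      simp only [Bool.or_eq_true, List.contains_iff_mem]
      exact hmemb i
    simp only [Function.comp]
    rw [pvMem_lin rows cols hc revealed i h0 hilt, pvMem_lin rows cols hc flagged i h0 hilt,
        ← hl1, ← hl2, hcont]
    simp [Bool.not_or]
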